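-- pv_equiv track=rewrite | github.com/Alexprinse/Sample | Juspay_prac/robot_energy.py | get_max_energy_optimized
-- ===== SOURCE A (Python) =====
-- from functools import lru_cache
--
-- def get_max_energy_optimized(s: str) -> int:
--     s_list = list(s)
--     n = len(s_list)
--
--     @lru_cache(maxsize=None)
--     def dfs(state: tuple) -> int:
--
--         state_list = list(state)
--         if 'B' not in state_list:
--             return 0  # No more B's to process
--
--         max_energy = 0
--         for i, c in enumerate(state_list):
--             if c != 'B':
--                 continue
--
--             left_count = 0
--             j = i - 1
--             while j >= 0 and state_list[j] == 'A':
--                 left_count += 1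
--                 j -= 1
--
--             right_count = 0
--             j = i + 1
--             while j < n and state_list[j] == 'A':
--                 right_count += 1
--                 j += 1
--
--             if left_count > 0:
--                 new_state = state_list[:]
--                 new_state[i - left_count:i + 1] = ['-'] + ['C'] * left_count
--                 energy = left_count + dfs(tuple(new_state))
--                 max_energy = max(max_energy, energy)
--
--             if right_count > 0:
--                 new_state = state_list[:]
--                 new_state[i:i + right_count + 1] = ['C'] * right_count + ['-']
--                 energy = right_count + dfs(tuple(new_state))
--                 max_energy = max(max_energy, energy)
--
--             new_state = state_list[:]
--             new_state[i] = '-'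
--             energy = dfs(tuple(new_state))
--             max_energy = max(max_energy, energy)
--
--             break
--
--         return max_energy
--
--     return dfs(tuple(s_list))
-- ===== SOURCE B (Python) =====
-- def get_max_energy_optimized(s: str) -> int:
--     # One left-to-right pass (O(n)): max-weight matching of B's to adjacent A-runs,
--     # tracked with three values: free = best with the trailing resource (A-run / B)
--     # still available, used = best where the trailing A-run is being claimed by the
--     # B on its left (grows by 1 per 'A'), r = current A-run length.
--     free = 0          # best value, trailing resource available
--     used = None       # best value with claim-in-progress on the trailing run
--     r = 0             # length of trailing A-run
--     prev_b = False    # last char was 'B' and it is the available resource in `free`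
--     for ch in s:
--         if ch == 'A':
--             if r > 0:
--                 if used is not None:
--                     used += 1
--                 r += 1
--             else:
--                 new_used = free + 1 if prev_b else None
--                 free = max(free, used) if used is not None else free
--                 used = new_used
--                 r = 1
--             prev_b = False
--         elif ch == 'B':
--             best = max(free, used) if used is not None else free
--             used = free + r if r > 0 else best
--             free = best
--             r = 0
--             prev_b = True
--         else:
--             free = max(free, used) if used is not None else free
--             used = None
--             r = 0
--             prev_b = False
--     return max(free, used) if used is not None else free
-- ===== Notes on version B (the rewrite author's own statement) =====
-- stated objective: alternative
-- what changed: A's memoized depth-first search over rewritten string states (branching at each 'B' and exploring many marked-up copies of the string) is replaced by a single left-to-right pass that solves the underlying max-weight matching of 'B's to adjacent 'A'-runs with a three-value dynamic program (best with trailing resource free, best with a claim in progress, current run length).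
import Mathlib
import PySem

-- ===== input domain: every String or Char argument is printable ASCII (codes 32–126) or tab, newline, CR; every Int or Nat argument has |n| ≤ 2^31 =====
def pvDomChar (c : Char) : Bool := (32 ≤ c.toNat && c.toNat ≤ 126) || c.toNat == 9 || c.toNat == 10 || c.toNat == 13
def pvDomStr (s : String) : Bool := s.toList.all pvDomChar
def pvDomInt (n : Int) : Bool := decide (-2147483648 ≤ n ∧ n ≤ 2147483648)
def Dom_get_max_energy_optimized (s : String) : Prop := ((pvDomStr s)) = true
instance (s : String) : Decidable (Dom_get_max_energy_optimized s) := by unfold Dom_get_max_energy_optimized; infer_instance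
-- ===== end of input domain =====

-- B replaces A's memoized depth-first search over rewritten string states by a
-- single left-to-right pass maintaining three values (a max-weight matching DP
-- over 'B's and their adjacent 'A'-runs); equal return value proved for every string.


-- ===== PORT A =====
-- Python's `for i, c in enumerate(state_list): if c != 'B': continue; …; break`
-- acts on the FIRST index holding 'B'; this helper is that loop.
def pvFirstB : List Char → Nat → Option Nat
  | [], _ => none
  | c :: t, i => if c ≠ 'B' then pvFirstB t (i + 1) else some i

-- `while j >= 0 and state_list[j] == 'A': left_count += 1; j -= 1`
def pvLeftCount (state : List Char) (j : Int) (acc : Nat) : Nat :=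
  if h : 0 ≤ j ∧ PySem.List.pyGet? state j = some 'A' then
    pvLeftCount state (j - 1) (acc + 1)
  else acc
termination_by (j + 1).toNat
decreasing_by omega

-- `while j < n and state_list[j] == 'A': right_count += 1; j += 1`
def pvRightCount (state : List Char) (n : Nat) (j : Int) (acc : Nat) : Nat :=
  if h : j < (n : Int) ∧ PySem.List.pyGet? state j = some 'A' then
    pvRightCount state n (j + 1) (acc + 1)
  else acc
termination_by ((n : Int) - j).toNat
decreasing_by omega

-- dfs of A.  `fuel` is only a totality guard: each recursive call is on a state
-- with one 'B' fewer, so the initial fuel (count of 'B' + 1) is never exhausted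
-- (proved in pvDfs_eq_Espec below).  The slice assignments
-- `new_state[a:b] = xs` are written out as take/append/drop, which is exact here
-- because 0 <= a <= b <= len(state) on every branch (left_count <= i by the
-- `j >= 0` loop guard).
def pvDfs : Nat → Nat → List Char → Int
  | 0, _, _ => 0
  | fuel + 1, n, state =>
    if ¬ ('B' ∈ state) then 0
    else
      match pvFirstB state 0 with
      | none => 0   -- unreachable: 'B' ∈ state
      | some i =>
        let L := pvLeftCount state ((i : Int) - 1) 0
        let R := pvRightCount state n ((i : Int) + 1) 0
        let me0 : Int := 0
        let me1 := if 0 < L then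
            max me0 ((L : Int) + pvDfs fuel n
              (state.take (i - L) ++ '-' :: (List.replicate L 'C' ++ state.drop (i + 1))))
          else me0
        let me2 := if 0 < R then
            max me1 ((R : Int) + pvDfs fuel n
              (state.take i ++ (List.replicate R 'C' ++ '-' :: state.drop (i + R + 1))))
          else me1
        max me2 (pvDfs fuel n (state.take i ++ '-' :: state.drop (i + 1)))

def get_max_energy_optimized (s : String) : Int :=
  pvDfs (s.toList.count 'B' + 1) s.toList.length s.toList

-- ===== PORT B =====
-- state: (free, used, r, prevB) as in Source B
def pvStep : Int × Option Int × Nat × Bool → Char → Int × Option Int × Nat × Bool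
  | (free, used, r, prevB), ch =>
    if ch = 'A' then
      if 0 < r then (free, used.map (· + 1), r + 1, false)
      else
        let newUsed := if prevB then some (free + 1) else none
        let free' := match used with | some u => max free u | none => free
        (free', newUsed, 1, false)
    else if ch = 'B' then
      let best := match used with | some u => max free u | none => free
      (best, some (if 0 < r then free + (r : Int) else best), 0, true)
    else
      let best := match used with | some u => max free u | none => free
      (best, none, 0, false)

def pvFinish : Int × Option Int × Nat × Bool → Int
  | (free, used, _, _) => match used with | some u => max free u | none => free

def get_max_energy_optimized_alt (s : String) : Int :=
  pvFinish (s.toList.foldl pvStep (0, none, 0, false))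

-- ===== PRECONDITION & SPEC =====
def Spec_get_max_energy_optimized (s : String) (out : Int) : Prop := out = get_max_energy_optimized_alt s
instance (s : String) (out : Int) : Decidable (Spec_get_max_energy_optimized s out) := by unfold Spec_get_max_energy_optimized; infer_instance

-- ===== CLAIM (what is proved, stated in full; the proofs are below) =====
def Claim_equal_get_max_energy_optimized : Prop := ∀ (s : String), Dom_get_max_energy_optimized s → Spec_get_max_energy_optimized s (get_max_energy_optimized s)

-- ===== LEMMAS AND PROOFS =====

-- leading run of 'A's
def leadA : List Char → Nat
  | 'A' :: t => leadA t + 1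
  | _ => 0

-- trailing run of 'A's
def trailA (l : List Char) : Nat := leadA l.reverse

theorem leadA_nil : leadA [] = 0 := rfl

theorem leadA_cons (c : Char) (t : List Char) :
    leadA (c :: t) = if c = 'A' then leadA t + 1 else 0 := by
  by_cases h : c = 'A'
  · subst h; simp [leadA]
  · rw [leadA.eq_def]
    split
    · next t' heq => simp_all
    · simp [h]

theorem leadA_le_length (l : List Char) : leadA l ≤ l.length := by
  induction l with
  | nil => simp [leadA_nil]
  | cons c t ih => rw [leadA_cons]; split_ifs <;> simp only [List.length_cons] <;> omega

theorem trailA_le_length (l : List Char) : trailA l ≤ l.length := by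
  simpa [trailA] using leadA_le_length l.reverse

theorem leadA_append (xs ys : List Char) :
    leadA (xs ++ ys) = if leadA xs = xs.length then xs.length + leadA ys else leadA xs := by
  induction xs with
  | nil => simp [leadA_nil]
  | cons c xs ih =>
    have hle := leadA_le_length xs
    rw [List.cons_append, leadA_cons, leadA_cons, ih]
    by_cases h : c = 'A' <;> split_ifs <;> simp_all <;> omega

theorem trailA_nil : trailA [] = 0 := rfl

theorem trailA_snoc (p : List Char) (c : Char) :
    trailA (p ++ [c]) = if c = 'A' then trailA p + 1 else 0 := by
  simp [trailA, List.reverse_append, leadA_cons]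

theorem trailA_cons (c : Char) (p : List Char) :
    trailA (c :: p) =
      if trailA p = p.length then p.length + (if c = 'A' then 1 else 0) else trailA p := by
  rw [trailA, List.reverse_cons, leadA_append, leadA_cons, leadA_nil]
  simp only [List.length_reverse]
  simp [trailA]

theorem trailA_replicateC (L : Nat) : trailA (List.replicate L 'C') = 0 := by
  cases L with
  | zero => simp [trailA_nil]
  | succ m =>
    have : List.replicate (m + 1) 'C' = List.replicate m 'C' ++ ['C'] := by
      rw [← List.replicate_succ']
    rw [this, trailA_snoc]; simp

-- the common specification: E l k = best energy obtainable from suffix l when a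
-- free run of k 'A's immediately precedes it
def Espec : List Char → Int → Int
  | [], _ => 0
  | c :: t, k =>
    if c = 'A' then Espec t (k + 1)
    else if c = 'B' then
      max (k + Espec t 0) ((leadA t : Int) + Espec (t.drop (leadA t)) 0)
    else Espec t 0
termination_by l => l.length
decreasing_by all_goals (simp [List.length_drop]; try omega)

-- value of a claim-in-progress continuation: the leading run is consumed
def Dspec (l : List Char) : Int := (leadA l : Int) + Espec (l.drop (leadA l)) 0

theorem Espec_nil (k : Int) : Espec [] k = 0 := by simp [Espec]

theorem Espec_cons (c : Char) (t : List Char) (k : Int) :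
    Espec (c :: t) k =
      if c = 'A' then Espec t (k + 1)
      else if c = 'B' then max (k + Espec t 0) (Dspec t)
      else Espec t 0 := by
  rw [Espec, Dspec]

theorem Espec_A (t : List Char) (k : Int) : Espec ('A' :: t) k = Espec t (k + 1) := by
  rw [Espec_cons, if_pos rfl]

theorem Espec_B (t : List Char) (k : Int) :
    Espec ('B' :: t) k = max (k + Espec t 0) (Dspec t) := by
  rw [Espec_cons, if_neg (by decide), if_pos rfl]

theorem Espec_other {c : Char} (h1 : c ≠ 'A') (h2 : c ≠ 'B') (t : List Char) (k : Int) :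
    Espec (c :: t) k = Espec t 0 := by
  rw [Espec_cons, if_neg h1, if_neg h2]

theorem Dspec_A (t : List Char) : Dspec ('A' :: t) = 1 + Dspec t := by
  rw [Dspec, Dspec, leadA_cons, if_pos rfl]
  simp only [List.drop_succ_cons]
  push_cast
  ring

theorem Dspec_B (t : List Char) : Dspec ('B' :: t) = max (Espec t 0) (Dspec t) := by
  rw [Dspec, leadA_cons, if_neg (by decide)]
  simp [Espec_B]

theorem Dspec_other {c : Char} (h1 : c ≠ 'A') (h2 : c ≠ 'B') (t : List Char) :
    Dspec (c :: t) = Espec t 0 := by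
  rw [Dspec, leadA_cons, if_neg h1]
  simp [Espec_other h1 h2]

theorem Dspec_nil : Dspec [] = 0 := by simp [Dspec, leadA_nil, Espec_nil]

theorem Espec_nonneg_aux : ∀ (n : Nat) (l : List Char), l.length ≤ n →
    ∀ (k : Int), 0 ≤ k → 0 ≤ Espec l k := by
  intro n
  induction n with
  | zero =>
    intro l hl k hk
    have : l = [] := List.eq_nil_of_length_eq_zero (by omega)
    subst this; simp [Espec_nil]
  | succ n ih =>
    intro l hl k hk
    match l with
    | [] => simp [Espec_nil]
    | c :: t =>
      simp only [List.length_cons] at hl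
      rw [Espec_cons]
      split_ifs with h1 h2
      · exact ih t (by omega) (k + 1) (by omega)
      · have h3 := ih t (by omega) 0 le_rfl
        exact le_max_of_le_left (by omega)
      · exact ih t (by omega) 0 le_rfl

theorem Espec_nonneg (l : List Char) (k : Int) (hk : 0 ≤ k) : 0 ≤ Espec l k :=
  Espec_nonneg_aux l.length l le_rfl k hk

theorem Espec_noB (l : List Char) (h : 'B' ∉ l) (k : Int) : Espec l k = 0 := by
  induction l generalizing k with
  | nil => simp [Espec_nil]
  | cons c t ih =>
    have hc : c ≠ 'B' := fun hc => h (by simp [hc])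
    have ht : 'B' ∉ t := fun ht => h (by simp [ht])
    by_cases hA : c = 'A'
    · subst hA; rw [Espec_A]; exact ih ht _
    · rw [Espec_other hA hc]; exact ih ht _

-- walking a 'B'-free prefix only sets up the pending-run counter
theorem Espec_append (p : List Char) (hp : 'B' ∉ p) : ∀ (q : List Char) (k : Int), 0 ≤ k →
    Espec (p ++ q) k = Espec q (if trailA p = p.length then k + trailA p else (trailA p : Int)) := by
  induction p with
  | nil => intro q k hk; simp [trailA_nil]
  | cons c p ih =>
    intro q k hk
    have hc : c ≠ 'B' := fun hc => hp (by simp [hc])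
    have hpp : 'B' ∉ p := fun ht => hp (by simp [ht])
    have hle := trailA_le_length p
    rw [List.cons_append]
    by_cases hA : c = 'A'
    · subst hA
      rw [Espec_A, ih hpp q (k + 1) (by omega), trailA_cons]
      simp only [List.length_cons]
      split_ifs <;> first
        | rfl
        | (exfalso; omega)
        | (congr 1; push_cast; omega)
    · rw [Espec_other hA hc, ih hpp q 0 le_rfl, trailA_cons]
      simp only [List.length_cons]
      split_ifs <;> first
        | rfl
        | (exfalso; omega)
        | (congr 1; push_cast; omega)

-- ---------- B side ----------

-- interpretation of a fold state in front of a suffix l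
def Phi (f : Int) (u : Option Int) (r : Nat) (pB : Bool) (l : List Char) : Int :=
  let fb := f + (if 0 < r then Espec l (r : Int)
                 else if pB then max (Espec l 0) (Dspec l) else Espec l 0)
  match u with
  | none => fb
  | some u => max fb (u + (if 0 < r then Dspec l else Espec l 0))

theorem foldl_step_phi : ∀ (l : List Char) (f : Int) (u : Option Int) (r : Nat) (pB : Bool),
    pvFinish (l.foldl pvStep (f, u, r, pB)) = Phi f u r pB l := by
  intro l
  induction l with
  | nil =>
    intro f u r pB
    cases u <;> cases pB <;> by_cases hr : 0 < r <;>
      simp [pvFinish, Phi, Espec_nil, Dspec_nil, hr]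
  | cons c t ih =>
    intro f u r pB
    rw [List.foldl_cons]
    by_cases hA : c = 'A'
    · subst hA
      by_cases hr : 0 < r
      · cases u <;>
          simp only [pvStep, if_pos rfl, if_pos hr, Option.map_some, Option.map_none] <;>
          rw [ih] <;>
          simp [Phi, hr, Espec_A, Dspec_A] <;>
          push_cast <;> omega
      · have hr0 : r = 0 := by omega
        subst hr0
        cases u <;> cases pB <;>
          simp only [pvStep, if_pos rfl, if_neg hr, if_pos rfl, Bool.false_eq_true,
            if_false, if_true] <;>
          rw [ih] <;>
          simp [Phi, Espec_A, Dspec_A] <;> omega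
    · by_cases hB : c = 'B'
      · subst hB
        by_cases hr : 0 < r <;>
          cases u <;> cases pB <;>
            simp only [pvStep, if_neg (by decide : ¬('B' : Char) = 'A'), if_pos rfl, hr,
              if_true, if_false] <;>
            rw [ih] <;>
            simp [Phi, hr, Espec_B, Dspec_B] <;> omega
      · by_cases hr : 0 < r <;>
          cases u <;> cases pB <;>
            simp only [pvStep, if_neg hA, if_neg hB] <;>
            rw [ih] <;>
            simp [Phi, hr, Espec_other hA hB, Dspec_other hA hB]

-- ---------- A side ----------

theorem pvFirstB_spec (p : List Char) : ∀ (t : List Char) (i : Nat), 'B' ∉ p →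
    pvFirstB (p ++ 'B' :: t) i = some (i + p.length) := by
  induction p with
  | nil => intro t i _; simp [pvFirstB]
  | cons c p ih =>
    intro t i hp
    have hc : c ≠ 'B' := fun hc => hp (by simp [hc])
    have hpp : 'B' ∉ p := fun ht => hp (by simp [ht])
    rw [List.cons_append]
    show (if c ≠ 'B' then pvFirstB (p ++ 'B' :: t) (i + 1) else some i) = _
    rw [if_pos hc, ih t (i + 1) hpp]
    simp; omega

theorem firstB_decomp (l : List Char) (h : 'B' ∈ l) :
    ∃ p t, l = p ++ 'B' :: t ∧ 'B' ∉ p := by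
  induction l with
  | nil => simp at h
  | cons c t ih =>
    by_cases hc : c = 'B'
    · exact ⟨[], t, by simp [hc], by simp⟩
    · have ht : 'B' ∈ t := by
        rcases List.mem_cons.mp h with h1 | h1
        · exact absurd h1.symm hc
        · exact h1
      obtain ⟨p, t', heq, hp⟩ := ih ht
      refine ⟨c :: p, t', by simp [heq], ?_⟩
      simp only [List.mem_cons, not_or]
      exact ⟨fun h' => hc h'.symm, hp⟩

theorem pvLeftCount_spec (p : List Char) : ∀ (q : List Char) (acc : Nat),
    pvLeftCount (p ++ q) ((p.length : Int) - 1) acc = trailA p + acc := by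
  induction p using List.reverseRecOn with
  | nil =>
    intro q acc
    rw [pvLeftCount, dif_neg (by norm_num)]
    simp [trailA_nil]
  | append_singleton p c ih =>
    intro q acc
    have hidx : (((p ++ [c]).length : Int)) - 1 = (p.length : Int) := by simp
    have hassoc : (p ++ [c]) ++ q = p ++ (c :: q) := by simp
    have hget : PySem.List.pyGet? ((p ++ [c]) ++ q) ((p.length : Int)) = some c := by
      rw [hassoc]; exact PySem.List.pyGet?_append_length ..
    rw [pvLeftCount, hidx]
    by_cases hc : c = 'A'
    · subst hc
      rw [dif_pos ⟨by omega, hget⟩]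
      have h3 : (p ++ ['A']) ++ q = p ++ (['A'] ++ q) := by simp
      rw [h3, ih (['A'] ++ q) (acc + 1), trailA_snoc, if_pos rfl]
      omega
    · rw [dif_neg ?_, trailA_snoc, if_neg hc]
      · omega
      · rintro ⟨-, hg⟩
        rw [hget] at hg
        exact hc (Option.some.inj hg)

theorem pvRightCount_spec : ∀ (q u : List Char) (acc : Nat),
    pvRightCount (u ++ q) (u ++ q).length ((u.length : Int)) acc = acc + leadA q := by
  intro q
  induction q with
  | nil =>
    intro u acc
    rw [pvRightCount, dif_neg (by simp)]
    simp [leadA_nil]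
  | cons c q ih =>
    intro u acc
    have hget : PySem.List.pyGet? (u ++ c :: q) ((u.length : Int)) = some c :=
      PySem.List.pyGet?_append_length ..
    rw [pvRightCount]
    by_cases hc : c = 'A'
    · subst hc
      rw [dif_pos ⟨by simp only [List.length_append, List.length_cons]; push_cast; omega, hget⟩]
      have h3 : u ++ 'A' :: q = (u ++ ['A']) ++ q := by simp
      have h4 : ((u.length : Int)) + 1 = (((u ++ ['A']).length : Nat) : Int) := by simp
      rw [h3, h4, ih (u ++ ['A']) (acc + 1), leadA_cons, if_pos rfl]
      omega
    · rw [dif_neg ?_, leadA_cons, if_neg hc]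
      · omega
      · rintro ⟨-, hg⟩
        rw [hget] at hg
        exact hc (Option.some.inj hg)

-- fuel-sufficiency + correctness of A's dfs
theorem pvDfs_eq_Espec : ∀ (fuel : Nat) (l : List Char),
    l.count 'B' < fuel → pvDfs fuel l.length l = Espec l 0 := by
  intro fuel
  induction fuel with
  | zero => intro l h; omega
  | succ fuel ih =>
    intro l hcount
    by_cases hB : 'B' ∈ l
    · obtain ⟨p, t, rfl, hp⟩ := firstB_decomp _ hB
      have hpcount : p.count 'B' = 0 := List.count_eq_zero.mpr hp
      have hcountl : (p ++ 'B' :: t).count 'B' = t.count 'B' + 1 := by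
        simp [List.count_append, hpcount]
      have htcount : t.count 'B' < fuel := by omega
      have hLle : trailA p ≤ p.length := trailA_le_length p
      have hRle : leadA t ≤ t.length := leadA_le_length t
      have hXnn : 0 ≤ Espec t 0 := Espec_nonneg t 0 le_rfl
      have hYnn : 0 ≤ Espec (t.drop (leadA t)) 0 := Espec_nonneg _ 0 le_rfl
      -- the loop results
      have hL : pvLeftCount (p ++ 'B' :: t) ((p.length : Int) - 1) 0 = trailA p := by
        rw [pvLeftCount_spec p ('B' :: t) 0]
        omega
      have hR : pvRightCount (p ++ 'B' :: t) (p ++ 'B' :: t).length ((p.length : Int) + 1) 0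
          = leadA t := by
        have h1 : p ++ 'B' :: t = (p ++ ['B']) ++ t := by simp
        have h2 : ((p.length : Int)) + 1 = (((p ++ ['B']).length : Nat) : Int) := by simp
        rw [h2, h1, pvRightCount_spec t (p ++ ['B']) 0]
        omega
      -- take/drop identities
      have htake : (p ++ 'B' :: t).take p.length = p := List.take_left ..
      have hdrop : (p ++ 'B' :: t).drop (p.length + 1) = t := by
        rw [show p ++ 'B' :: t = (p ++ ['B']) ++ t from by simp,
            show p.length + 1 = (p ++ ['B']).length from by simp]
        exact List.drop_left ..
      have htakeL : (p ++ 'B' :: t).take (p.length - trailA p)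
          = p.take (p.length - trailA p) := by
        rw [List.take_append_of_le_length (by omega)]
      have hdropR : (p ++ 'B' :: t).drop (p.length + leadA t + 1) = t.drop (leadA t) := by
        calc (p ++ 'B' :: t).drop (p.length + leadA t + 1)
            = ((p ++ 'B' :: t).drop (p.length + 1)).drop (leadA t) := by
              rw [List.drop_drop]; congr 1; omega
          _ = t.drop (leadA t) := by rw [hdrop]
      -- Espec values of the three successor states
      have hEskip : Espec (p ++ '-' :: t) 0 = Espec t 0 := by
        rw [Espec_append p hp ('-' :: t) 0 le_rfl]
        split_ifs <;> rw [Espec_other (by decide) (by decide)]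
      have hEleft : Espec (p.take (p.length - trailA p)
            ++ '-' :: (List.replicate (trailA p) 'C' ++ t)) 0 = Espec t 0 := by
        have hnb : 'B' ∉ p.take (p.length - trailA p) :=
          fun hmem => hp (List.mem_of_mem_take hmem)
        rw [Espec_append _ hnb _ 0 le_rfl]
        have step : ∀ k : Int, Espec ('-' :: (List.replicate (trailA p) 'C' ++ t)) k
            = Espec t 0 := by
          intro k
          rw [Espec_other (by decide) (by decide)]
          have hnb2 : 'B' ∉ List.replicate (trailA p) 'C' := by simp [List.mem_replicate]
          rw [Espec_append _ hnb2 t 0 le_rfl, trailA_replicateC]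
          simp only [List.length_replicate]
          split_ifs <;> norm_num
        split_ifs <;> exact step _
      have hEright : Espec (p ++ (List.replicate (leadA t) 'C' ++ '-' :: t.drop (leadA t))) 0
          = Espec (t.drop (leadA t)) 0 := by
        rw [Espec_append p hp _ 0 le_rfl]
        have key : ∀ k : Int, 0 ≤ k →
            Espec (List.replicate (leadA t) 'C' ++ '-' :: t.drop (leadA t)) k
              = Espec (t.drop (leadA t)) 0 := by
          intro k hk
          have hnb2 : 'B' ∉ List.replicate (leadA t) 'C' := by simp [List.mem_replicate]
          rw [Espec_append _ hnb2 _ k hk, trailA_replicateC]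
          split_ifs <;> rw [Espec_other (by decide) (by decide)]
        split_ifs <;> exact key _ (by omega)
      have hEmain : Espec (p ++ 'B' :: t) 0
          = max ((trailA p : Int) + Espec t 0)
                ((leadA t : Int) + Espec (t.drop (leadA t)) 0) := by
        rw [Espec_append p hp ('B' :: t) 0 le_rfl]
        have hκ : (if trailA p = p.length then (0 : Int) + (trailA p : Int)
            else (trailA p : Int)) = (trailA p : Int) := by split_ifs <;> omega
        rw [hκ, Espec_B, Dspec]
      -- counts and lengths of the successor states
      have hlenskip : (p ++ '-' :: t).length = (p ++ 'B' :: t).length := by simp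
      have hcskip : (p ++ '-' :: t).count 'B' < fuel := by
        simp only [List.count_append, hpcount]
        simp [List.count_cons]
        omega
      have hlenleft : (p.take (p.length - trailA p)
            ++ '-' :: (List.replicate (trailA p) 'C' ++ t)).length
          = (p ++ 'B' :: t).length := by
        simp [List.length_take]
        omega
      have hcleft : (p.take (p.length - trailA p)
            ++ '-' :: (List.replicate (trailA p) 'C' ++ t)).count 'B' < fuel := by
        have h0 : (p.take (p.length - trailA p)).count 'B' = 0 :=
          List.count_eq_zero.mpr (fun hmem => hp (List.mem_of_mem_take hmem))
        simp only [List.count_append, List.count_cons, h0, List.count_replicate]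
        simp
        omega
      have hlenright : (p ++ (List.replicate (leadA t) 'C' ++ '-' :: t.drop (leadA t))).length
          = (p ++ 'B' :: t).length := by
        simp [List.length_drop]
        omega
      have hcright : (p ++ (List.replicate (leadA t) 'C' ++ '-' :: t.drop (leadA t))).count 'B'
          < fuel := by
        have hsub : (t.drop (leadA t)).count 'B' ≤ t.count 'B' :=
          (List.drop_sublist (leadA t) t).count_le _
        simp only [List.count_append, List.count_cons, hpcount, List.count_replicate]
        simp
        omega
      -- the induction hypothesis at the three recursive calls
      have ihleft := ih _ hcleft
      have ihright := ih _ hcright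
      have ihskip := ih _ hcskip
      rw [hlenleft] at ihleft
      rw [hlenright] at ihright
      rw [hlenskip] at ihskip
      -- unfold one step of A's dfs
      rw [pvDfs, if_neg (not_not_intro hB), pvFirstB_spec p t 0 hp]
      simp only [Nat.zero_add, hL, hR, htake, hdrop, htakeL, hdropR]
      rw [ihleft, ihright, ihskip, hEskip, hEleft, hEright, hEmain]
      by_cases hLpos : 0 < trailA p <;> by_cases hRpos : 0 < leadA t
      · simp only [if_pos hLpos, if_pos hRpos]; omega
      · have h0 : leadA t = 0 := by omega
        rw [h0] at *
        simp only [if_pos hLpos, if_neg hRpos, List.drop_zero, Nat.cast_zero] at *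
        omega
      · have h0 : trailA p = 0 := by omega
        rw [h0] at *
        simp only [if_neg hLpos, if_pos hRpos, Nat.cast_zero] at *
        omega
      · have h0 : leadA t = 0 := by omega
        have h1 : trailA p = 0 := by omega
        rw [h0, h1] at *
        simp only [if_neg hLpos, if_neg hRpos, List.drop_zero, Nat.cast_zero] at *
        omega
    · rw [pvDfs, if_pos (by simp [hB]), Espec_noB l hB]

-- ===== VERDICT (by name: the statement is the Claim_ definition above) =====
theorem get_max_energy_optimized_spec : Claim_equal_get_max_energy_optimized := by
  intro s _
  show _ = _
  rw [get_max_energy_optimized, get_max_energy_optimized_alt,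
      pvDfs_eq_Espec _ _ (Nat.lt_succ_self _), foldl_step_phi]
  simp [Phi]
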